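-- pv_equiv track=rewrite | github.com/Ced97110/nano | app/persona_systems/audit/cost_monitor.py | _normalize_model_name
-- ===== SOURCE A (Python) =====
-- MODEL_PRICING: dict[str, tuple[float, float]] = {
--     # OpenAI
--     "gpt-4o":             (2.50,  10.00),
--     "gpt-4o-mini":        (0.15,   0.60),
--     "gpt-4-turbo":       (10.00,  30.00),
--     "gpt-4":             (30.00,  60.00),
--     "gpt-3.5-turbo":      (0.50,   1.50),
--     "o1":                (15.00,  60.00),
--     "o1-mini":            (3.00,  12.00),
--     "o3-mini":            (1.10,   4.40),
--
--     # Anthropic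
--     "claude-3-opus":     (15.00,  75.00),
--     "claude-3-sonnet":    (3.00,  15.00),
--     "claude-3-haiku":     (0.25,   1.25),
--     "claude-3.5-sonnet":  (3.00,  15.00),
--     "claude-3.5-haiku":   (0.80,   4.00),
--     "claude-opus-4":     (15.00,  75.00),
--     "claude-sonnet-4":    (3.00,  15.00),
--
--     # Google
--     "gemini-1.5-pro":     (1.25,   5.00),
--     "gemini-1.5-flash":   (0.075,  0.30),
--     "gemini-2.0-flash":   (0.10,   0.40),
--
--     # Local / self-hosted — zero cost
--     "glm-4.7":            (0.0,    0.0),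
--     "glm-4.7:cloud":      (0.0,    0.0),
--     "ollama":             (0.0,    0.0),
--     "local":              (0.0,    0.0),
-- }
--
-- def _normalize_model_name(model: str) -> str:
--     """Best-effort normalization of model identifiers.
--
--     Handles patterns like "openai/gpt-4o", "anthropic/claude-3-sonnet",
--     "ollama/llama3", etc.
--     """
--     if not model:
--         return ""
--
--     # Strip known provider prefixes
--     lower = model.lower()
--     for prefix in ("openai/", "anthropic/", "google/", "ollama/"):
--         if lower.startswith(prefix):
--             stripped = model[len(prefix):]
--             # ollama/* models are free
--             if prefix == "ollama/":
--                 return "ollama"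
--             return stripped
--
--     # Direct match
--     if lower in MODEL_PRICING:
--         return lower
--
--     # Partial match: find the longest key that is a prefix of the model
--     for key in sorted(MODEL_PRICING.keys(), key=len, reverse=True):
--         if lower.startswith(key):
--             return key
--
--     return model
-- ===== SOURCE B (Python) =====
-- MODEL_PRICING: dict[str, tuple[float, float]] = {
--     "gpt-4o":             (2.50,  10.00),
--     "gpt-4o-mini":        (0.15,   0.60),
--     "gpt-4-turbo":       (10.00,  30.00),
--     "gpt-4":             (30.00,  60.00),
--     "gpt-3.5-turbo":      (0.50,   1.50),
--     "o1":                (15.00,  60.00),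
--     "o1-mini":            (3.00,  12.00),
--     "o3-mini":            (1.10,   4.40),
--     "claude-3-opus":     (15.00,  75.00),
--     "claude-3-sonnet":    (3.00,  15.00),
--     "claude-3-haiku":     (0.25,   1.25),
--     "claude-3.5-sonnet":  (3.00,  15.00),
--     "claude-3.5-haiku":   (0.80,   4.00),
--     "claude-opus-4":     (15.00,  75.00),
--     "claude-sonnet-4":    (3.00,  15.00),
--     "gemini-1.5-pro":     (1.25,   5.00),
--     "gemini-1.5-flash":   (0.075,  0.30),
--     "gemini-2.0-flash":   (0.10,   0.40),
--     "glm-4.7":            (0.0,    0.0),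
--     "glm-4.7:cloud":      (0.0,    0.0),
--     "ollama":             (0.0,    0.0),
--     "local":              (0.0,    0.0),
-- }
--
--
-- def _normalize_model_name(model: str) -> str:
--     """Same normalization, without sorting: a single pass keeps the longest
--     pricing key that prefixes the lowercased model (a direct match is just
--     the longest such prefix, so it needs no separate branch)."""
--     if not model:
--         return ""
--     lower = model.lower()
--     if lower.startswith("ollama/"):
--         return "ollama"
--     for prefix in ("openai/", "anthropic/", "google/"):
--         if lower.startswith(prefix):
--             return model[len(prefix):]
--     best = ""
--     for key in MODEL_PRICING:
--         if len(key) > len(best) and lower.startswith(key):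
--             best = key
--     return best or model
-- ===== Notes on version B (the rewrite author's own statement) =====
-- stated objective: simpler
-- what changed: The fallback no longer sorts the pricing keys by length: a single unsorted pass keeps the longest key that prefixes the lowercased model, which also subsumes the separate direct-match branch; the ollama/ prefix is hoisted out of the stripping loop.
import Mathlib
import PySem

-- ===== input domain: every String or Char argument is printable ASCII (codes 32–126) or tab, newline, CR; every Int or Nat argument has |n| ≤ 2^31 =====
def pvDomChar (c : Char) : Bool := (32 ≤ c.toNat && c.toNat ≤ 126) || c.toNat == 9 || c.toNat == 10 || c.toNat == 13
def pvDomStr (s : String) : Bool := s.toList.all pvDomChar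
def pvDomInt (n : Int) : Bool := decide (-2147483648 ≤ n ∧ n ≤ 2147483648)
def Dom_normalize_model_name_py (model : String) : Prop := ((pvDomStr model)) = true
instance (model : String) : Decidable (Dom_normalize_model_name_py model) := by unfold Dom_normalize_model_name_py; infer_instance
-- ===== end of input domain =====

-- B replaces A's sorted-by-length fallback with one unsorted pass keeping the longest matching key
-- (which also subsumes A's direct-match branch); objective: simpler. Return values are identical.

-- keys of MODEL_PRICING in insertion order (the function uses only the keys; the float prices are never read)
def pvPricingKeys : List String :=
  ["gpt-4o", "gpt-4o-mini", "gpt-4-turbo", "gpt-4", "gpt-3.5-turbo", "o1", "o1-mini", "o3-mini",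
   "claude-3-opus", "claude-3-sonnet", "claude-3-haiku", "claude-3.5-sonnet", "claude-3.5-haiku",
   "claude-opus-4", "claude-sonnet-4", "gemini-1.5-pro", "gemini-1.5-flash", "gemini-2.0-flash",
   "glm-4.7", "glm-4.7:cloud", "ollama", "local"]

-- ===== PORT A =====
def normalize_model_name_py (model : String) : String :=
  if model = "" then ""
  else
    let lower := PySem.Str.lower model
    -- for prefix in (...): if lower.startswith(prefix): …  (first match = find?)
    match ["openai/", "anthropic/", "google/", "ollama/"].find?
        (fun p => PySem.Str.startswith lower p) with
    | some p =>
        if p = "ollama/" then "ollama"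
        else PySem.Str.slice model (some ((PySem.Str.len p : Int))) none
    | none =>
      if lower ∈ pvPricingKeys then lower
      else
        match (PySem.List.sorted pvPricingKeys (fun k => PySem.Str.len k) true).find?
            (fun k => PySem.Str.startswith lower k) with
        | some k => k
        | none => model

-- ===== PORT B =====
def normalize_model_name_py_alt (model : String) : String :=
  if model = "" then ""
  else
    let lower := PySem.Str.lower model
    if PySem.Str.startswith lower "ollama/" then "ollama"
    else
      match ["openai/", "anthropic/", "google/"].find?
          (fun p => PySem.Str.startswith lower p) with
      | some p => PySem.Str.slice model (some ((PySem.Str.len p : Int))) none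
      | none =>
        let best := pvPricingKeys.foldl
          (fun best k =>
            if PySem.Str.len k > PySem.Str.len best && PySem.Str.startswith lower k then k else best) ""
        if best = "" then model else best

-- ===== PRECONDITION & SPEC =====
def Spec_normalize_model_name_py (model : String) (out : String) : Prop := out = normalize_model_name_py_alt model
instance (model : String) (out : String) : Decidable (Spec_normalize_model_name_py model out) := by unfold Spec_normalize_model_name_py; infer_instance

-- ===== CLAIM (what is proved, stated in full; the proofs are below) =====
def Claim_equal_normalize_model_name_py : Prop := ∀ (model : String), Dom_normalize_model_name_py model → Spec_normalize_model_name_py model (normalize_model_name_py model)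

-- ===== LEMMAS AND PROOFS =====

-- two prefixes of the same string compare: if neither is a prefix of the other, contradiction
theorem pv_no_two_prefixes (lower a b : String)
    (ha : PySem.Str.startswith lower a = true) (hb : PySem.Str.startswith lower b = true)
    (hab : ¬ a.toList <+: b.toList) (hba : ¬ b.toList <+: a.toList) : False := by
  simp [pysem] at ha hb
  rcases List.prefix_or_prefix_of_prefix ha hb with h | h
  · exact hab h
  · exact hba h

-- two same-length prefixes of the same string are equal
theorem pv_prefix_eq_of_len_eq (lower a b : String)
    (ha : PySem.Str.startswith lower a = true) (hb : PySem.Str.startswith lower b = true)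
    (hlen : PySem.Str.len a = PySem.Str.len b) : a = b := by
  simp [pysem] at ha hb hlen
  rcases List.prefix_or_prefix_of_prefix ha hb with h | h
  · exact String.toList_inj.mp (List.IsPrefix.eq_of_length h hlen)
  · exact (String.toList_inj.mp (List.IsPrefix.eq_of_length h hlen.symm)).symm

-- a prefix is no longer than the string
theorem pv_len_le_of_startswith (lower a : String)
    (ha : PySem.Str.startswith lower a = true) : PySem.Str.len a ≤ PySem.Str.len lower := by
  simp [pysem] at ha ⊢
  exact List.IsPrefix.length_le ha

-- invariant of B's running-max fold
theorem pv_fold_inv (lower : String) (L : List String) (init : String) :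
    (L.foldl (fun best k =>
        if PySem.Str.len k > PySem.Str.len best && PySem.Str.startswith lower k then k else best) init
      = init ∨
      (L.foldl (fun best k =>
        if PySem.Str.len k > PySem.Str.len best && PySem.Str.startswith lower k then k else best) init ∈ L ∧
       PySem.Str.startswith lower (L.foldl (fun best k =>
        if PySem.Str.len k > PySem.Str.len best && PySem.Str.startswith lower k then k else best) init) = true)) ∧
    PySem.Str.len init ≤ PySem.Str.len (L.foldl (fun best k =>
        if PySem.Str.len k > PySem.Str.len best && PySem.Str.startswith lower k then k else best) init) ∧
    (∀ k ∈ L, PySem.Str.startswith lower k = true →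
      PySem.Str.len k ≤ PySem.Str.len (L.foldl (fun best k =>
        if PySem.Str.len k > PySem.Str.len best && PySem.Str.startswith lower k then k else best) init)) := by
  induction L generalizing init with
  | nil => simp
  | cons a t ih =>
    simp only [List.foldl_cons]
    by_cases hc : (PySem.Str.len a > PySem.Str.len init && PySem.Str.startswith lower a) = true
    · rw [if_pos hc]
      obtain ⟨hmem, hle, hmax⟩ := ih a
      simp only [Bool.and_eq_true, decide_eq_true_eq] at hc
      refine ⟨?_, ?_, ?_⟩
      · rcases hmem with h | ⟨h1, h2⟩
        · exact Or.inr ⟨by rw [h]; exact List.mem_cons_self, by rw [h]; exact hc.2⟩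
        · exact Or.inr ⟨List.mem_cons_of_mem _ h1, h2⟩
      · omega
      · intro k hk hks
        rcases List.mem_cons.mp hk with rfl | hk'
        · exact hle
        · exact hmax k hk' hks
    · rw [if_neg hc]
      obtain ⟨hmem, hle, hmax⟩ := ih init
      refine ⟨?_, hle, ?_⟩
      · rcases hmem with h | ⟨h1, h2⟩
        · exact Or.inl h
        · exact Or.inr ⟨List.mem_cons_of_mem _ h1, h2⟩
      · intro k hk hks
        rcases List.mem_cons.mp hk with rfl | hk'
        · simp only [Bool.and_eq_true, decide_eq_true_eq, not_and] at hc
          by_cases hgt : PySem.Str.len init < PySem.Str.len k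
          · exact absurd hks (by simpa using hc hgt)
          · omega
        · exact hmax k hk' hks

-- find? on a length-descending list returns a match of maximal length
theorem pv_find_sorted_max (p : String → Bool) (S : List String) (k : String)
    (hs : S.Pairwise (fun a b => PySem.Str.len b ≤ PySem.Str.len a)) (h : S.find? p = some k) :
    ∀ j ∈ S, p j = true → PySem.Str.len j ≤ PySem.Str.len k := by
  induction S with
  | nil => simp at h
  | cons a t ih =>
    rw [List.pairwise_cons] at hs
    by_cases ha : p a = true
    · rw [List.find?_cons_of_pos ha] at h
      cases h
      intro j hj _
      rcases List.mem_cons.mp hj with rfl | hj'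
      · exact le_refl _
      · exact hs.1 j hj'
    · rw [List.find?_cons_of_neg ha] at h
      intro j hj hpj
      rcases List.mem_cons.mp hj with rfl | hj'
      · exact absurd hpj ha
      · exact ih hs.2 h j hj' hpj

-- all pricing keys are nonempty
theorem pv_keys_nonempty : ∀ k ∈ pvPricingKeys, 1 ≤ PySem.Str.len k := by decide

-- if A's sorted-first-match fallback finds nothing, B's fold stays at ""
theorem pv_fallback_none (lower : String)
    (hfind : (PySem.List.sorted pvPricingKeys (fun k => PySem.Str.len k) true).find?
        (fun k => PySem.Str.startswith lower k) = none) :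
    pvPricingKeys.foldl
      (fun best k =>
        if PySem.Str.len k > PySem.Str.len best && PySem.Str.startswith lower k then k else best) ""
    = "" := by
  have hperm : (PySem.List.sorted pvPricingKeys (fun k => PySem.Str.len k) true).Perm pvPricingKeys :=
    PySem.List.sorted_perm _ _ _
  obtain ⟨hmem, _, _⟩ := pv_fold_inv lower pvPricingKeys ""
  rcases hmem with h | ⟨h1, h2⟩
  · exact h
  · have := List.find?_eq_none.mp hfind _ (hperm.mem_iff.mpr h1)
    exact absurd h2 (by simpa using this)

-- if A's sorted-first-match fallback finds k, B's fold returns exactly k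
theorem pv_fallback_some (lower k : String)
    (hfind : (PySem.List.sorted pvPricingKeys (fun k => PySem.Str.len k) true).find?
        (fun k => PySem.Str.startswith lower k) = some k) :
    pvPricingKeys.foldl
      (fun best k =>
        if PySem.Str.len k > PySem.Str.len best && PySem.Str.startswith lower k then k else best) ""
    = k := by
  have hperm : (PySem.List.sorted pvPricingKeys (fun k => PySem.Str.len k) true).Perm pvPricingKeys :=
    PySem.List.sorted_perm _ _ _
  have hpair : (PySem.List.sorted pvPricingKeys (fun k => PySem.Str.len k) true).Pairwise
      (fun a b => PySem.Str.len b ≤ PySem.Str.len a) :=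
    PySem.List.sorted_pairwise_rev _ _
  obtain ⟨hmem, _, hmax⟩ := pv_fold_inv lower pvPricingKeys ""
  set b := pvPricingKeys.foldl
      (fun best k =>
        if PySem.Str.len k > PySem.Str.len best && PySem.Str.startswith lower k then k else best) "" with hb
  have hpk : PySem.Str.startswith lower k = true := List.find?_some hfind
  have hkmem : k ∈ pvPricingKeys := hperm.mem_iff.mp (List.mem_of_find?_eq_some hfind)
  have hkb : PySem.Str.len k ≤ PySem.Str.len b := hmax k hkmem hpk
  have hlen0 : PySem.Str.len "" = 0 := by decide
  have hbne : b ≠ "" := by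
    intro h
    have := pv_keys_nonempty k hkmem
    rw [h, hlen0] at hkb
    omega
  obtain ⟨hbmem, hpb⟩ : b ∈ pvPricingKeys ∧ PySem.Str.startswith lower b = true := by
    rcases hmem with h | h
    · exact absurd h hbne
    · exact h
  have hbk : PySem.Str.len b ≤ PySem.Str.len k :=
    pv_find_sorted_max _ _ _ hpair hfind b (hperm.mem_iff.mpr hbmem) hpb
  exact pv_prefix_eq_of_len_eq lower b k hpb hpk (le_antisymm hbk hkb)

-- when lower itself is a key, B's fold returns exactly lower
theorem pv_fold_of_mem (lower : String) (h : lower ∈ pvPricingKeys) :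
    pvPricingKeys.foldl
      (fun best k =>
        if PySem.Str.len k > PySem.Str.len best && PySem.Str.startswith lower k then k else best) ""
    = lower := by
  obtain ⟨hmem, _, hmax⟩ := pv_fold_inv lower pvPricingKeys ""
  set b := pvPricingKeys.foldl
      (fun best k =>
        if PySem.Str.len k > PySem.Str.len best && PySem.Str.startswith lower k then k else best) "" with hb
  have hself : PySem.Str.startswith lower lower = true := by
    simp [pysem]
  have hlb : PySem.Str.len lower ≤ PySem.Str.len b := hmax lower h hself
  have hlen0 : PySem.Str.len "" = 0 := by decide
  have hbne : b ≠ "" := by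
    intro he
    have := pv_keys_nonempty lower h
    rw [he, hlen0] at hlb
    omega
  obtain ⟨_, hpb⟩ : b ∈ pvPricingKeys ∧ PySem.Str.startswith lower b = true := by
    rcases hmem with hx | hx
    · exact absurd hx hbne
    · exact hx
  have hbl : PySem.Str.len b ≤ PySem.Str.len lower := pv_len_le_of_startswith lower b hpb
  exact pv_prefix_eq_of_len_eq lower b lower hpb hself (le_antisymm hbl hlb)

-- ===== VERDICT helpers =====
-- the two port bodies agree for any value of `lower` (used at lower = model.lower())
theorem pv_body_eq (model lower : String) :
    (match ["openai/", "anthropic/", "google/", "ollama/"].find?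
        (fun p => PySem.Str.startswith lower p) with
     | some p =>
        if p = "ollama/" then "ollama"
        else PySem.Str.slice model (some ((PySem.Str.len p : Int))) none
     | none =>
        if lower ∈ pvPricingKeys then lower
        else
          match (PySem.List.sorted pvPricingKeys (fun k => PySem.Str.len k) true).find?
              (fun k => PySem.Str.startswith lower k) with
          | some k => k
          | none => model)
    = (if PySem.Str.startswith lower "ollama/" then "ollama"
       else
        match ["openai/", "anthropic/", "google/"].find?
            (fun p => PySem.Str.startswith lower p) with
        | some p => PySem.Str.slice model (some ((PySem.Str.len p : Int))) none
        | none =>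
          let best := pvPricingKeys.foldl
            (fun best k =>
              if PySem.Str.len k > PySem.Str.len best && PySem.Str.startswith lower k then k else best) ""
          if best = "" then model else best) := by
by_cases h1 : PySem.Str.startswith lower "openai/" = true
· have h4 : PySem.Str.startswith lower "ollama/" = false := by
    by_contra hc
    exact pv_no_two_prefixes lower "openai/" "ollama/" h1 (by simpa using hc)
      (by decide) (by decide)
  have e4 : (["openai/", "anthropic/", "google/", "ollama/"].find?
      (fun p => PySem.Str.startswith lower p)) = some "openai/" :=
    List.find?_cons_of_pos h1
  have e3 : (["openai/", "anthropic/", "google/"].find?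
      (fun p => PySem.Str.startswith lower p)) = some "openai/" :=
    List.find?_cons_of_pos h1
  rw [e4, e3, h4]
  simp
· by_cases h2 : PySem.Str.startswith lower "anthropic/" = true
  · have h4 : PySem.Str.startswith lower "ollama/" = false := by
      by_contra hc
      exact pv_no_two_prefixes lower "anthropic/" "ollama/" h2 (by simpa using hc)
        (by decide) (by decide)
    have e4 : (["openai/", "anthropic/", "google/", "ollama/"].find?
        (fun p => PySem.Str.startswith lower p)) = some "anthropic/" := by
      rw [List.find?_cons_of_neg h1, List.find?_cons_of_pos h2]
    have e3 : (["openai/", "anthropic/", "google/"].find?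
        (fun p => PySem.Str.startswith lower p)) = some "anthropic/" := by
      rw [List.find?_cons_of_neg h1, List.find?_cons_of_pos h2]
    rw [e4, e3, h4]
    simp
  · by_cases h3 : PySem.Str.startswith lower "google/" = true
    · have h4 : PySem.Str.startswith lower "ollama/" = false := by
        by_contra hc
        exact pv_no_two_prefixes lower "google/" "ollama/" h3 (by simpa using hc)
          (by decide) (by decide)
      have e4 : (["openai/", "anthropic/", "google/", "ollama/"].find?
          (fun p => PySem.Str.startswith lower p)) = some "google/" := by
        rw [List.find?_cons_of_neg h1, List.find?_cons_of_neg h2, List.find?_cons_of_pos h3]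
      have e3 : (["openai/", "anthropic/", "google/"].find?
          (fun p => PySem.Str.startswith lower p)) = some "google/" := by
        rw [List.find?_cons_of_neg h1, List.find?_cons_of_neg h2, List.find?_cons_of_pos h3]
      rw [e4, e3, h4]
      simp
    · by_cases h4 : PySem.Str.startswith lower "ollama/" = true
      · have e4 : (["openai/", "anthropic/", "google/", "ollama/"].find?
            (fun p => PySem.Str.startswith lower p)) = some "ollama/" := by
          rw [List.find?_cons_of_neg h1, List.find?_cons_of_neg h2, List.find?_cons_of_neg h3,
            List.find?_cons_of_pos h4]
        rw [e4, h4]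
        simp
      · have e4 : (["openai/", "anthropic/", "google/", "ollama/"].find?
            (fun p => PySem.Str.startswith lower p)) = none := by
          rw [List.find?_cons_of_neg h1, List.find?_cons_of_neg h2, List.find?_cons_of_neg h3,
            List.find?_cons_of_neg h4]
          rfl
        have e3 : (["openai/", "anthropic/", "google/"].find?
            (fun p => PySem.Str.startswith lower p)) = none := by
          rw [List.find?_cons_of_neg h1, List.find?_cons_of_neg h2, List.find?_cons_of_neg h3]
          rfl
        have h4f : PySem.Str.startswith lower "ollama/" = false := by
          simpa using h4
        rw [e4, e3, h4f]
        simp only [Bool.false_eq_true, if_false]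
        by_cases hdm : lower ∈ pvPricingKeys
        · rw [if_pos hdm, pv_fold_of_mem lower hdm]
          have hne : lower ≠ "" := by
            intro he
            have := pv_keys_nonempty lower hdm
            rw [he] at this
            exact absurd this (by decide)
          rw [if_neg hne]
        · rw [if_neg hdm]
          cases hfind : (PySem.List.sorted pvPricingKeys (fun k => PySem.Str.len k) true).find?
              (fun k => PySem.Str.startswith lower k) with
          | none =>
            rw [pv_fallback_none lower hfind, if_pos rfl]
          | some k =>
            rw [pv_fallback_some lower k hfind]
            have hkmem : k ∈ pvPricingKeys :=
              ((PySem.List.sorted_perm pvPricingKeys (fun k => PySem.Str.len k) true).mem_iff).mp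
                (List.mem_of_find?_eq_some hfind)
            have hkne : k ≠ "" := by
              intro he
              have := pv_keys_nonempty k hkmem
              rw [he] at this
              exact absurd this (by decide)
            rw [if_neg hkne]

-- ===== VERDICT (by name: the statement is the Claim_ definition above) =====
theorem normalize_model_name_py_spec : Claim_equal_normalize_model_name_py := by
  intro model _
  unfold Spec_normalize_model_name_py normalize_model_name_py normalize_model_name_py_alt
  by_cases hm : model = ""
  · simp [hm]
  · rw [if_neg hm, if_neg hm]
    exact pv_body_eq model (PySem.Str.lower model)
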